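-- pv_equiv track=rewrite | github.com/zaemyung/sentsplit | sentsplit/train.py | _sample_to_features
-- ===== SOURCE A (Python) =====
-- from typing import List, Set, Tuple
--
-- def _sample_to_features(sample: List[Tuple[str, str]], ngram: int) -> List[List[str]]:
--     def _char_to_features(i: int) -> List[str]:
--         char = sample[i][0]
--         feats = [
--             'bias',
--             f'char={char}',
--             f'char.isdigit={char.isdigit()}',
--             f'char.isupper={char.isupper()}',
--         ]
--         for j in range(1, min(i, ngram) + 1):
--             char_j = sample[i - j][0]
--             feats.append(f'-{j}:char={char_j}')
--         for j in range(1, min(len(sample) - 1 - i, ngram) + 1):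
--             char_j = sample[i + j][0]
--             feats.append(f'+{j}:char={char_j}')
--         return feats
--
--     features = []
--     for i in range(len(sample)):
--         features.append(_char_to_features(i))
--     return features
-- ===== SOURCE B (Python) =====
-- from typing import List, Tuple
--
-- def _sample_to_features(sample: List[Tuple[str, str]], ngram: int) -> List[List[str]]:
--     n = len(sample)
--     features = [
--         ['bias', f'char={c}', f'char.isdigit={c.isdigit()}', f'char.isupper={c.isupper()}']
--         for c, _ in sample
--     ]
--     for j in range(1, min(ngram, n - 1) + 1):
--         for i in range(j, n):
--             features[i].append(f'-{j}:char={sample[i - j][0]}')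
--     for j in range(1, min(ngram, n - 1) + 1):
--         for i in range(n - j):
--             features[i].append(f'+{j}:char={sample[i + j][0]}')
--     return features
-- ===== Notes on version B (the rewrite author's own statement) =====
-- stated objective: alternative
-- what changed: B interchanges the loop nest: it builds all base feature lists in one pass over the sample, then sweeps positions once per offset j (offset-major) appending the '-j:'/'+j:' context features, instead of A's per-position inner loops over offsets.
import Mathlib
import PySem

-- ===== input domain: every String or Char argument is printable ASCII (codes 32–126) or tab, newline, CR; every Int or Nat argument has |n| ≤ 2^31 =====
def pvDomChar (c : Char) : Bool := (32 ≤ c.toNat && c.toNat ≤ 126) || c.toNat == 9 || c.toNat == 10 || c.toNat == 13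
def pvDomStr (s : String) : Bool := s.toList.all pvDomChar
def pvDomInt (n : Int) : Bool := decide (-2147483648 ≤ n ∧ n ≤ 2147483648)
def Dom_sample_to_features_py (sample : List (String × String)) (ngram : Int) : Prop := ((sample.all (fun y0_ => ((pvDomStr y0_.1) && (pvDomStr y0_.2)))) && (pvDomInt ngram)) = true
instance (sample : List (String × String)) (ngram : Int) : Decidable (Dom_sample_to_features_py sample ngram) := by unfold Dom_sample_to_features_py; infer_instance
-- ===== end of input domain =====

-- B builds the base feature list per position in one pass and then adds the context
-- features offset-major (one sweep over positions per offset j); same output, alternative decomposition.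

-- shared f-string primitives (Python semantics of str(bool), str.isupper, sample[i][0])
def pvBoolStr (b : Bool) : String := if b then "True" else "False"
-- Python str.isupper(): some cased character, and no lowercase one (exact on the ASCII domain)
def pvStrIsupper (s : String) : Bool := (s.toList.any PySem.Chars.isupper) && !(s.toList.any PySem.Chars.islower)
def pvCharAt (sample : List (String × String)) (i : Int) : String :=
  ((PySem.List.pyGet? sample i).getD ("", "")).1
def pvBaseFeats (c : String) : List String :=
  ["bias", "char=" ++ c,
   "char.isdigit=" ++ pvBoolStr (PySem.Str.strIsdigit c),
   "char.isupper=" ++ pvBoolStr (pvStrIsupper c)]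

-- ===== PORT A =====
def pvCharToFeatures (sample : List (String × String)) (ngram : Int) (i : Int) : List String :=
  let char := pvCharAt sample i
  let feats := pvBaseFeats char
  let feats := (PySem.List.pyRange 1 (min i ngram + 1) 1).foldl
      (fun fs j => fs ++ ["-" ++ PySem.Int.toStr j ++ ":char=" ++ pvCharAt sample (i - j)]) feats
  (PySem.List.pyRange 1 (min ((sample.length : Int) - 1 - i) ngram + 1) 1).foldl
      (fun fs j => fs ++ ["+" ++ PySem.Int.toStr j ++ ":char=" ++ pvCharAt sample (i + j)]) feats

def sample_to_features_py (sample : List (String × String)) (ngram : Int) : List (List String) :=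
  (PySem.List.pyRange 0 (sample.length : Int) 1).foldl
    (fun acc i => acc ++ [pvCharToFeatures sample ngram i]) []

-- ===== PORT B =====
def sample_to_features_py_alt (sample : List (String × String)) (ngram : Int) : List (List String) :=
  let n : Int := (sample.length : Int)
  let base := sample.map (fun p => pvBaseFeats p.1)
  let afterBack := (PySem.List.pyRange 1 (min ngram (n - 1) + 1) 1).foldl
    (fun fs j => (PySem.List.pyRange j n 1).foldl
      (fun fs i => fs.modify i.toNat
        (fun l => l ++ ["-" ++ PySem.Int.toStr j ++ ":char=" ++ pvCharAt sample (i - j)])) fs) base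
  (PySem.List.pyRange 1 (min ngram (n - 1) + 1) 1).foldl
    (fun fs j => (PySem.List.pyRange 0 (n - j) 1).foldl
      (fun fs i => fs.modify i.toNat
        (fun l => l ++ ["+" ++ PySem.Int.toStr j ++ ":char=" ++ pvCharAt sample (i + j)])) fs) afterBack

-- ===== PRECONDITION & SPEC =====
def Spec_sample_to_features_py (sample : List (String × String)) (ngram : Int) (out : List (List String)) : Prop := out = sample_to_features_py_alt sample ngram
instance (sample : List (String × String)) (ngram : Int) (out : List (List String)) : Decidable (Spec_sample_to_features_py sample ngram out) := by unfold Spec_sample_to_features_py; infer_instance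

-- ===== CLAIM (what is proved, stated in full; the proofs are below) =====
def Claim_equal_sample_to_features_py : Prop := ∀ (sample : List (String × String)) (ngram : Int), Dom_sample_to_features_py sample ngram → Spec_sample_to_features_py sample ngram (sample_to_features_py sample ngram)

-- ===== LEMMAS AND PROOFS =====

-- one inner sweep (for i in r: features[i].append(...)) read off at index k:
-- if k occurs in r the element is modified once, otherwise untouched
theorem getElem?_foldl_modify {α : Type} (l : List Int) (hpos : ∀ i ∈ l, 0 ≤ i)
    (hnd : l.Nodup) (g : Int → α → α) (fs : List α) (k : Nat) :
    (l.foldl (fun fs i => fs.modify i.toNat (g i)) fs)[k]? =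
      if (k : Int) ∈ l then (fs[k]?).map (g (k : Int)) else fs[k]? := by
  induction l generalizing fs with
  | nil => simp
  | cons i t ih =>
    have hi : 0 ≤ i := hpos i List.mem_cons_self
    simp only [List.foldl_cons]
    rw [ih (fun x hx => hpos x (List.mem_cons_of_mem _ hx)) hnd.of_cons]
    by_cases hik : i = (k : Int)
    · subst hik
      have hkt : ((k : Int)) ∉ t := (List.nodup_cons.mp hnd).1
      simp [hkt]
    · have htn : i.toNat ≠ k := by omega
      have h1 : (fs.modify i.toNat (g i))[k]? = fs[k]? := by
        simp [htn]
      have hik' : ¬ ((k : Int) = i) := fun h => hik h.symm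
      simp [h1, List.mem_cons, hik']

theorem length_foldl_modify {α : Type} (l : List Int) (g : Int → α → α) (fs : List α) :
    (l.foldl (fun fs i => fs.modify i.toNat (g i)) fs).length = fs.length := by
  induction l generalizing fs with
  | nil => rfl
  | cons i t ih => simp [List.foldl_cons, ih, List.length_modify]

-- the backward stage of B, read at index k (m sweeps, offsets 1..m)
theorem back_stage (sample : List (String × String)) (v : Nat → List String)
    (fs : List (List String)) (hfs : ∀ k : Nat, k < sample.length → fs[k]? = some (v k))
    (m : Nat) (k : Nat) (hk : k < sample.length) :
    ((PySem.List.pyRange 1 ((m : Int) + 1) 1).foldl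
      (fun fs j => (PySem.List.pyRange j (sample.length : Int) 1).foldl
        (fun fs i => fs.modify i.toNat
          (fun l => l ++ ["-" ++ PySem.Int.toStr j ++ ":char=" ++ pvCharAt sample (i - j)])) fs) fs)[k]? =
    some (v k ++ (PySem.List.pyRange 1 (min (k : Int) (m : Int) + 1) 1).map
      (fun j => "-" ++ PySem.Int.toStr j ++ ":char=" ++ pvCharAt sample ((k : Int) - j))) := by
  induction m generalizing fs with
  | zero =>
    rw [PySem.List.pyRange_one_eq_nil (by omega)]
    rw [PySem.List.pyRange_one_eq_nil (by omega)]
    simp [hfs k hk]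
  | succ m ih =>
    push_cast
    rw [PySem.List.pyRange_one_succ_right (by omega : (1 : Int) ≤ (m : Int) + 1),
        List.foldl_append, List.foldl_cons, List.foldl_nil]
    rw [getElem?_foldl_modify (PySem.List.pyRange ((m : Int) + 1) (sample.length : Int) 1)
        (fun i hi => by have := PySem.List.mem_pyRange_one.mp hi; omega)
        (PySem.List.nodup_pyRange_one _ _) _ _ k]
    rw [ih fs hfs]
    by_cases hm : (m : Int) + 1 ≤ (k : Int)
    · have hmem : (k : Int) ∈ PySem.List.pyRange ((m : Int) + 1) (sample.length : Int) 1 := by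
        rw [PySem.List.mem_pyRange_one]; omega
      rw [if_pos hmem]
      have h1 : min (k : Int) ((m : Int) + 1) = (m : Int) + 1 := by omega
      have h2 : min (k : Int) (m : Int) = (m : Int) := by omega
      rw [h1, h2,
        PySem.List.pyRange_one_succ_right (by omega : (1 : Int) ≤ (m : Int) + 1),
        List.map_append]
      simp [List.append_assoc]
    · have hmem : (k : Int) ∉ PySem.List.pyRange ((m : Int) + 1) (sample.length : Int) 1 := by
        rw [PySem.List.mem_pyRange_one]; omega
      rw [if_neg hmem]
      have h1 : min (k : Int) ((m : Int) + 1) = min (k : Int) (m : Int) := by omega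
      rw [h1]

-- the forward stage of B, read at index k
theorem fwd_stage (sample : List (String × String)) (v : Nat → List String)
    (fs : List (List String)) (hfs : ∀ k : Nat, k < sample.length → fs[k]? = some (v k))
    (m : Nat) (k : Nat) (hk : k < sample.length) :
    ((PySem.List.pyRange 1 ((m : Int) + 1) 1).foldl
      (fun fs j => (PySem.List.pyRange 0 ((sample.length : Int) - j) 1).foldl
        (fun fs i => fs.modify i.toNat
          (fun l => l ++ ["+" ++ PySem.Int.toStr j ++ ":char=" ++ pvCharAt sample (i + j)])) fs) fs)[k]? =
    some (v k ++ (PySem.List.pyRange 1 (min ((sample.length : Int) - 1 - k) (m : Int) + 1) 1).map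
      (fun j => "+" ++ PySem.Int.toStr j ++ ":char=" ++ pvCharAt sample ((k : Int) + j))) := by
  induction m generalizing fs with
  | zero =>
    rw [PySem.List.pyRange_one_eq_nil (by omega)]
    rw [PySem.List.pyRange_one_eq_nil (by omega)]
    simp [hfs k hk]
  | succ m ih =>
    push_cast
    rw [PySem.List.pyRange_one_succ_right (by omega : (1 : Int) ≤ (m : Int) + 1),
        List.foldl_append, List.foldl_cons, List.foldl_nil]
    rw [getElem?_foldl_modify (PySem.List.pyRange 0 ((sample.length : Int) - ((m : Int) + 1)) 1)
        (fun i hi => by have := PySem.List.mem_pyRange_one.mp hi; omega)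
        (PySem.List.nodup_pyRange_one _ _) _ _ k]
    rw [ih fs hfs]
    by_cases hm : (m : Int) + 1 ≤ (sample.length : Int) - 1 - (k : Int)
    · have hmem : (k : Int) ∈ PySem.List.pyRange 0 ((sample.length : Int) - ((m : Int) + 1)) 1 := by
        rw [PySem.List.mem_pyRange_one]; omega
      rw [if_pos hmem]
      have h1 : min ((sample.length : Int) - 1 - (k : Int)) ((m : Int) + 1) = (m : Int) + 1 := by omega
      have h2 : min ((sample.length : Int) - 1 - (k : Int)) (m : Int) = (m : Int) := by omega
      rw [h1, h2,
        PySem.List.pyRange_one_succ_right (by omega : (1 : Int) ≤ (m : Int) + 1),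
        List.map_append]
      simp [List.append_assoc]
    · have hmem : (k : Int) ∉ PySem.List.pyRange 0 ((sample.length : Int) - ((m : Int) + 1)) 1 := by
        rw [PySem.List.mem_pyRange_one]; omega
      rw [if_neg hmem]
      have h1 : min ((sample.length : Int) - 1 - (k : Int)) ((m : Int) + 1)
          = min ((sample.length : Int) - 1 - (k : Int)) (m : Int) := by omega
      rw [h1]

-- the backward / forward context features of position i, as A computes them
def pvBack (sample : List (String × String)) (ngram : Int) (i : Int) : List String :=
  (PySem.List.pyRange 1 (min i ngram + 1) 1).map
    (fun j => "-" ++ PySem.Int.toStr j ++ ":char=" ++ pvCharAt sample (i - j))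
def pvFwd (sample : List (String × String)) (ngram : Int) (i : Int) : List String :=
  (PySem.List.pyRange 1 (min ((sample.length : Int) - 1 - i) ngram + 1) 1).map
    (fun j => "+" ++ PySem.Int.toStr j ++ ":char=" ++ pvCharAt sample (i + j))

theorem flatten_map_singleton {α β : Type} (l : List α) (f : α → β) :
    (l.map (fun x => [f x])).flatten = l.map f := by
  induction l with
  | nil => rfl
  | cons x t ih => simp [ih]

theorem charToFeatures_eq (sample : List (String × String)) (ngram i : Int) :
    pvCharToFeatures sample ngram i =
      pvBaseFeats (pvCharAt sample i) ++ pvBack sample ngram i ++ pvFwd sample ngram i := by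
  unfold pvCharToFeatures pvBack pvFwd
  simp [flatten_map_singleton, List.append_assoc]

theorem A_eq_map (sample : List (String × String)) (ngram : Int) :
    sample_to_features_py sample ngram
      = (PySem.List.pyRange 0 (sample.length : Int) 1).map (pvCharToFeatures sample ngram) := by
  unfold sample_to_features_py
  rw [PySem.List.foldl_append_singleton_eq_map]
  rfl

theorem length_A (sample : List (String × String)) (ngram : Int) :
    (sample_to_features_py sample ngram).length = sample.length := by
  rw [A_eq_map]
  simp [PySem.List.length_pyRange_one]

theorem length_outer {α : Type} (l : List Int) (r : Int → List Int)
    (g : Int → Int → α → α) (fs : List α) :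
    (l.foldl (fun fs j => (r j).foldl (fun fs i => fs.modify i.toNat (g j i)) fs) fs).length
      = fs.length := by
  induction l generalizing fs with
  | nil => rfl
  | cons j t ih => simp [List.foldl_cons, ih, length_foldl_modify]

theorem length_alt (sample : List (String × String)) (ngram : Int) :
    (sample_to_features_py_alt sample ngram).length = sample.length := by
  unfold sample_to_features_py_alt
  rw [length_outer, length_outer, List.length_map]

theorem base_at (sample : List (String × String)) (k : Nat) (hk : k < sample.length) :
    (sample.map (fun p => pvBaseFeats p.1))[k]? = some (pvBaseFeats (pvCharAt sample (k : Int))) := by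
  have h : pvCharAt sample (k : Int) = (sample[k]'hk).1 := by
    simp [pvCharAt, PySem.List.pyGet?_natCast, List.getElem?_eq_getElem hk]
  rw [h]
  simp [List.getElem?_eq_getElem hk]

theorem alt_at (sample : List (String × String)) (ngram : Int) (k : Nat) (hk : k < sample.length) :
    (sample_to_features_py_alt sample ngram)[k]? =
      some (pvBaseFeats (pvCharAt sample (k : Int)) ++ pvBack sample ngram (k : Int)
            ++ pvFwd sample ngram (k : Int)) := by
  have hkint : (k : Int) < (sample.length : Int) := by exact_mod_cast hk
  unfold sample_to_features_py_alt
  simp only []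
  by_cases hng : 0 ≤ ngram
  · set M := min ngram ((sample.length : Int) - 1) with hM
    obtain ⟨m, hm⟩ : ∃ m : Nat, M = (m : Int) :=
      ⟨M.toNat, (Int.toNat_of_nonneg (by omega)).symm⟩
    have eB : pvBack sample (m : Int) (k : Int) = pvBack sample ngram (k : Int) := by
      unfold pvBack
      have e : min (k : Int) (m : Int) = min (k : Int) ngram := by omega
      rw [e]
    have eF : pvFwd sample (m : Int) (k : Int) = pvFwd sample ngram (k : Int) := by
      unfold pvFwd
      have e : min ((sample.length : Int) - 1 - (k : Int)) (m : Int)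
          = min ((sample.length : Int) - 1 - (k : Int)) ngram := by omega
      rw [e]
    rw [hm]
    rw [fwd_stage sample
        (fun k => pvBaseFeats (pvCharAt sample (k : Int)) ++ pvBack sample (m : Int) (k : Int)) _
        (fun k hk => by rw [back_stage sample _ _ (base_at sample) m k hk]; rfl) m k hk]
    show some (pvBaseFeats (pvCharAt sample (k : Int)) ++ pvBack sample (m : Int) (k : Int)
          ++ pvFwd sample (m : Int) (k : Int)) = _
    rw [eB, eF]
  · rw [PySem.List.pyRange_one_eq_nil
      (by omega : min ngram ((sample.length : Int) - 1) + 1 ≤ 1)]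
    simp only [List.foldl_nil]
    rw [base_at sample k hk]
    have e2 : pvBack sample ngram (k : Int) = [] := by
      unfold pvBack
      rw [PySem.List.pyRange_one_eq_nil (by omega : min (k : Int) ngram + 1 ≤ 1)]
      rfl
    have e3 : pvFwd sample ngram (k : Int) = [] := by
      unfold pvFwd
      rw [PySem.List.pyRange_one_eq_nil
        (by omega : min ((sample.length : Int) - 1 - (k : Int)) ngram + 1 ≤ 1)]
      rfl
    rw [e2, e3]
    simp

theorem main_eq (sample : List (String × String)) (ngram : Int) :
    sample_to_features_py sample ngram = sample_to_features_py_alt sample ngram := by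
  apply List.ext_getElem?
  intro k
  by_cases hk : k < sample.length
  · rw [alt_at sample ngram k hk, A_eq_map,
      PySem.List.getElem?_map_pyRange_zero _ _ _ hk, charToFeatures_eq]
  · rw [List.getElem?_eq_none (by rw [length_A]; omega),
      List.getElem?_eq_none (by rw [length_alt]; omega)]

-- ===== VERDICT (by name: the statement is the Claim_ definition above) =====
theorem sample_to_features_py_spec : Claim_equal_sample_to_features_py := by
  intro sample ngram _
  unfold Spec_sample_to_features_py
  exact main_eq sample ngram
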